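-- pv_equiv track=rewrite | github.com/YadhiraVT/minimal2 | minimal/__init__.py | fibonacci_multiplos
-- ===== SOURCE A (Python) =====
-- def fibonacci_multiplos(n):
--     fibs = []
--     a, b = 0, 1
--     while a < n:
--         if (a%5)==0:
--             fibs.append(a)
--         a, b = b, a+b
--     return fibs
-- ===== SOURCE B (Python) =====
-- def fibonacci_multiplos(n):
--     # The Fibonacci numbers divisible by 5 are exactly F(0), F(5), F(10), ...,
--     # which obey g(k) = 11*g(k-1) + g(k-2) with g(0)=0, g(1)=5: generate them
--     # directly by recursion, no modulo test.
--     if n <= 0: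
--         return []
--
--     def rest(x, y):
--         return [] if y >= n else [y] + rest(y, 11 * y + x)
--
--     return [0] + rest(0, 5)
-- ===== Notes on version B (the rewrite author's own statement) =====
-- stated objective: alternative
-- what changed: B drops A's Fibonacci scan with a %5 test and instead generates exactly the Fibonacci multiples of 5 (every 5th Fibonacci number) by recursion on the pair recurrence g(k)=11*g(k-1)+g(k-2) from seeds 0, 5, producing one term per call instead of one per Fibonacci index.
import Mathlib
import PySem

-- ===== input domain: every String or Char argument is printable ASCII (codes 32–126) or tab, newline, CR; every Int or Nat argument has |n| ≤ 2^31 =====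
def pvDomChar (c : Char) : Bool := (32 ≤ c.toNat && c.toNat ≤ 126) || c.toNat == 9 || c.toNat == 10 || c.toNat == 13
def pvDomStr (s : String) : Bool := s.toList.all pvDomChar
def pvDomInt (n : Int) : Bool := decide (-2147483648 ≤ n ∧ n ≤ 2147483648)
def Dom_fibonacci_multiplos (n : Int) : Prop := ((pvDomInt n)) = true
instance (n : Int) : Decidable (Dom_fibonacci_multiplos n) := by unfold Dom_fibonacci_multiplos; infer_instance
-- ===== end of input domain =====

-- B replaces A's scan of all Fibonacci numbers with a mod test by a recursion that
-- generates every 5th Fibonacci number (exactly the multiples of 5) directly.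

-- ===== PORT A =====
-- A's `while a < n` loop; the fuel 5*(n.toNat+2) strictly exceeds the number of
-- iterations Python performs (fib k ≥ k-1), so the port computes exactly A's loop.
def fibMulLoopA (fuel : Nat) (n a b : Int) : List Int :=
  match fuel with
  | 0 => []
  | f+1 =>
    if a < n then
      (if PySem.Int.mod a 5 == 0 then a :: fibMulLoopA f n b (a+b)
       else fibMulLoopA f n b (a+b))
    else []

def fibonacci_multiplos (n : Int) : List Int := fibMulLoopA (5 * (n.toNat + 2)) n 0 1

-- ===== PORT B =====
-- B's recursive helper `rest`; fuel n.toNat strictly exceeds its call depth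
-- (its terms grow by at least 5 per call, starting from 5).
def fibMulRest : Nat → Int → Int → Int → List Int
  | 0, _, _, _ => []
  | f+1, n, x, y => if n ≤ y then [] else [y] ++ fibMulRest f n y (11 * y + x)

def fibonacci_multiplos_alt (n : Int) : List Int :=
  if n ≤ 0 then [] else [0] ++ fibMulRest n.toNat n 0 5

-- ===== PRECONDITION & SPEC =====
def Spec_fibonacci_multiplos (n : Int) (out : List Int) : Prop := out = fibonacci_multiplos_alt n
instance (n : Int) (out : List Int) : Decidable (Spec_fibonacci_multiplos n out) := by unfold Spec_fibonacci_multiplos; infer_instance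

-- ===== CLAIM (what is proved, stated in full; the proofs are below) =====
def Claim_equal_fibonacci_multiplos : Prop := ∀ (n : Int), Dom_fibonacci_multiplos n → Spec_fibonacci_multiplos n (fibonacci_multiplos n)

-- ===== LEMMAS AND PROOFS =====

-- proof-side reference loop: the plain "emit x while x < n" pair iteration
def fibMulLoopB (fuel : Nat) (n x y : Int) : List Int :=
  match fuel with
  | 0 => []
  | f+1 =>
    if x < n then x :: fibMulLoopB f n y (11*y + x)
    else []

theorem fibMul_fib_add_five (k : Nat) :
    Nat.fib (k+5) = 5 * Nat.fib (k+1) + 3 * Nat.fib k := by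
  have h2 : Nat.fib (k+2) = Nat.fib k + Nat.fib (k+1) := Nat.fib_add_two
  have h3 : Nat.fib (k+3) = Nat.fib (k+1) + Nat.fib (k+2) := Nat.fib_add_two
  have h4 : Nat.fib (k+4) = Nat.fib (k+2) + Nat.fib (k+3) := Nat.fib_add_two
  have h5 : Nat.fib (k+5) = Nat.fib (k+3) + Nat.fib (k+4) := Nat.fib_add_two
  omega

theorem fibMul_fib_add_ten (k : Nat) :
    Nat.fib (k+10) = 11 * Nat.fib (k+5) + Nat.fib k := by
  have h2 : Nat.fib (k+2) = Nat.fib k + Nat.fib (k+1) := Nat.fib_add_two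
  have a5 : Nat.fib (k+5) = 5 * Nat.fib (k+1) + 3 * Nat.fib k := fibMul_fib_add_five k
  have a6 : Nat.fib (k+6) = 5 * Nat.fib (k+2) + 3 * Nat.fib (k+1) := fibMul_fib_add_five (k+1)
  have a10 : Nat.fib (k+10) = 5 * Nat.fib (k+6) + 3 * Nat.fib (k+5) := fibMul_fib_add_five (k+5)
  omega

theorem fibMul_dvd_iff : ∀ k : Nat, 5 ∣ Nat.fib k ↔ 5 ∣ k := by
  intro k
  induction k using Nat.strong_induction_on with
  | _ k ih =>
    match k with
    | 0 => decide
    | 1 => decide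
    | 2 => decide
    | 3 => decide
    | 4 => decide
    | (m+5) =>
      have h := fibMul_fib_add_five m
      have hm := ih m (by omega)
      rcases hm with ⟨hm1, hm2⟩
      constructor
      · intro hd; omega
      · intro hd; omega

theorem fibMulLoopB_ge (f : Nat) (n x y : Int) (h : n ≤ x) : fibMulLoopB f n x y = [] := by
  cases f with
  | zero => rfl
  | succ f => simp [fibMulLoopB, not_lt.mpr h]

theorem fibMul_mod_true (k : Nat) (h : 5 ∣ Nat.fib k) :
    (PySem.Int.mod ((Nat.fib k : Int)) 5 == 0) = true := by
  simp only [beq_iff_eq, PySem.Int.mod_eq_zero_iff_dvd]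
  omega

theorem fibMul_mod_false (k : Nat) (h : ¬ 5 ∣ Nat.fib k) :
    (PySem.Int.mod ((Nat.fib k : Int)) 5 == 0) = false := by
  simp only [beq_eq_false_iff_ne, ne_eq, PySem.Int.mod_eq_zero_iff_dvd]
  omega

theorem fibMul_cast_step (k : Nat) :
    ((Nat.fib k : Int)) + (Nat.fib (k+1) : Int) = (Nat.fib (k+2) : Int) := by
  have := Nat.fib_add_two (n := k); push_cast [this]; ring

theorem fibMul_cast_ten (k : Nat) :
    11 * (Nat.fib (k+5) : Int) + (Nat.fib k : Int) = (Nat.fib (k+10) : Int) := by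
  have := fibMul_fib_add_ten k; push_cast [this]; ring

theorem fibMul_loopA_succ (f : Nat) (n a b : Int) :
    fibMulLoopA (f+1) n a b
      = if a < n then
          (if PySem.Int.mod a 5 == 0 then a :: fibMulLoopA f n b (a+b)
           else fibMulLoopA f n b (a+b))
        else [] := rfl

theorem fibMul_loopB_succ (f : Nat) (n x y : Int) :
    fibMulLoopB (f+1) n x y
      = if x < n then x :: fibMulLoopB f n y (11*y + x) else [] := rfl

-- one A-iteration at an index not divisible by 5: nothing is appended
theorem fibMul_skip (f : Nat) (n : Int) (k : Nat) (hk : ¬ (5 ∣ Nat.fib k))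
    (h : ((Nat.fib k : Int)) < n) :
    fibMulLoopA (f+1) n (Nat.fib k : Int) (Nat.fib (k+1) : Int)
      = fibMulLoopA f n (Nat.fib (k+1) : Int) (Nat.fib (k+2) : Int) := by
  have hm := fibMul_mod_false k hk
  rw [fibMul_loopA_succ, if_pos h, if_neg (by rw [hm]; simp), fibMul_cast_step k]

theorem fibMul_mono (i i' : Nat) (h : i ≤ i') :
    ((Nat.fib i : Int)) ≤ (Nat.fib i' : Int) := by
  exact_mod_cast Nat.fib_mono h

theorem fibMul_main (n : Int) : ∀ (fB j : Nat),
    fibMulLoopA (5*fB) n (Nat.fib (5*j) : Int) (Nat.fib (5*j+1) : Int)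
      = fibMulLoopB fB n (Nat.fib (5*j) : Int) (Nat.fib (5*j+5) : Int) := by
  intro fB
  induction fB with
  | zero => intro j; rfl
  | succ fB ih =>
    intro j
    have hndvd : ∀ i : Nat, 1 ≤ i → i ≤ 4 → ¬ (5 ∣ Nat.fib (5*j+i)) := by
      intro i h1 h4 hd
      have := (fibMul_dvd_iff (5*j+i)).mp hd
      omega
    by_cases h0 : ((Nat.fib (5*j) : Int)) < n
    · -- first iteration: index 5*j is divisible by 5, both sides append fib(5*j)
      have hm0 : (PySem.Int.mod ((Nat.fib (5*j) : Int)) 5 == 0) = true :=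
        fibMul_mod_true (5*j) ((fibMul_dvd_iff (5*j)).mpr ⟨j, by ring⟩)
      have eA : fibMulLoopA (5*(fB+1)) n (Nat.fib (5*j) : Int) (Nat.fib (5*j+1) : Int)
          = (Nat.fib (5*j) : Int) :: fibMulLoopA (5*fB+4) n (Nat.fib (5*j+1) : Int) (Nat.fib (5*j+2) : Int) := by
        have : fibMulLoopA ((5*fB+4)+1) n (Nat.fib (5*j) : Int) (Nat.fib (5*j+1) : Int)
            = (Nat.fib (5*j) : Int) :: fibMulLoopA (5*fB+4) n (Nat.fib (5*j+1) : Int) (Nat.fib (5*j+2) : Int) := by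
          rw [fibMul_loopA_succ, if_pos h0, if_pos hm0, fibMul_cast_step (5*j)]
        rw [show 5*(fB+1) = (5*fB+4)+1 by ring]; exact this
      have eB : fibMulLoopB (fB+1) n (Nat.fib (5*j) : Int) (Nat.fib (5*j+5) : Int)
          = (Nat.fib (5*j) : Int) :: fibMulLoopB fB n (Nat.fib (5*j+5) : Int) (Nat.fib (5*j+10) : Int) := by
        rw [fibMul_loopB_succ, if_pos h0, fibMul_cast_ten (5*j)]
      rw [eA, eB]
      congr 1
      -- tail: four more A-iterations (indices 5*j+1 .. 5*j+4 never divisible by 5)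
      by_cases h1 : ((Nat.fib (5*j+1) : Int)) < n
      · have s1 : fibMulLoopA (5*fB+4) n (Nat.fib (5*j+1) : Int) (Nat.fib (5*j+2) : Int)
            = fibMulLoopA (5*fB+3) n (Nat.fib (5*j+2) : Int) (Nat.fib (5*j+3) : Int) :=
          fibMul_skip (5*fB+3) n (5*j+1) (hndvd 1 (by omega) (by omega)) h1
        rw [s1]
        by_cases h2 : ((Nat.fib (5*j+2) : Int)) < n
        · have s2 : fibMulLoopA (5*fB+3) n (Nat.fib (5*j+2) : Int) (Nat.fib (5*j+3) : Int)
              = fibMulLoopA (5*fB+2) n (Nat.fib (5*j+3) : Int) (Nat.fib (5*j+4) : Int) :=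
            fibMul_skip (5*fB+2) n (5*j+2) (hndvd 2 (by omega) (by omega)) h2
          rw [s2]
          by_cases h3 : ((Nat.fib (5*j+3) : Int)) < n
          · have s3 : fibMulLoopA (5*fB+2) n (Nat.fib (5*j+3) : Int) (Nat.fib (5*j+4) : Int)
                = fibMulLoopA (5*fB+1) n (Nat.fib (5*j+4) : Int) (Nat.fib (5*j+5) : Int) :=
              fibMul_skip (5*fB+1) n (5*j+3) (hndvd 3 (by omega) (by omega)) h3
            rw [s3]
            by_cases h4 : ((Nat.fib (5*j+4) : Int)) < n
            · have s4 : fibMulLoopA (5*fB+1) n (Nat.fib (5*j+4) : Int) (Nat.fib (5*j+5) : Int)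
                  = fibMulLoopA (5*fB) n (Nat.fib (5*j+5) : Int) (Nat.fib (5*j+6) : Int) :=
                fibMul_skip (5*fB) n (5*j+4) (hndvd 4 (by omega) (by omega)) h4
              rw [s4]
              have ihj := ih (j+1)
              rw [show 5*(j+1) = 5*j+5 by ring] at ihj
              have e1 : (5*j+5)+1 = 5*j+6 := by omega
              have e5 : (5*j+5)+5 = 5*j+10 := by omega
              rw [e1, e5] at ihj
              exact ihj
            · rw [fibMul_loopA_succ, if_neg h4]
              exact (fibMulLoopB_ge fB n _ _ (le_trans (not_lt.mp h4) (fibMul_mono (5*j+4) (5*j+5) (by omega)))).symm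
          · rw [fibMul_loopA_succ, if_neg h3]
            exact (fibMulLoopB_ge fB n _ _ (le_trans (not_lt.mp h3) (fibMul_mono (5*j+3) (5*j+5) (by omega)))).symm
        · rw [fibMul_loopA_succ, if_neg h2]
          exact (fibMulLoopB_ge fB n _ _ (le_trans (not_lt.mp h2) (fibMul_mono (5*j+2) (5*j+5) (by omega)))).symm
      · rw [fibMul_loopA_succ, if_neg h1]
        exact (fibMulLoopB_ge fB n _ _ (le_trans (not_lt.mp h1) (fibMul_mono (5*j+1) (5*j+5) (by omega)))).symm
    · rw [show 5*(fB+1) = (5*fB+4)+1 by ring, fibMul_loopA_succ, if_neg h0,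
          fibMul_loopB_succ, if_neg h0]

-- B's recursion `rest` equals the reference loop shifted by one state
theorem fibMul_rest_eq (f : Nat) : ∀ (n x y : Int),
    fibMulRest f n x y = fibMulLoopB f n y (11*y + x) := by
  induction f with
  | zero => intro n x y; rfl
  | succ f ih =>
    intro n x y
    rw [fibMul_loopB_succ]
    show (if n ≤ y then ([] : List Int) else [y] ++ fibMulRest f n y (11*y + x))
        = if y < n then y :: fibMulLoopB f n (11*y + x) (11*(11*y + x) + y) else []
    rw [ih n y (11*y + x)]
    by_cases h : y < n
    · rw [if_neg (not_le.mpr h), if_pos h]; rfl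
    · rw [if_pos (not_lt.mp h), if_neg h]

theorem fibMul_alt_eq (n : Int) :
    fibonacci_multiplos_alt n = fibMulLoopB (n.toNat + 1) n 0 5 := by
  rw [fibMul_loopB_succ]
  unfold fibonacci_multiplos_alt
  rw [fibMul_rest_eq]
  by_cases h : n ≤ 0
  · rw [if_pos h, if_neg (not_lt.mpr h)]
  · rw [if_neg h, if_pos (not_le.mp h)]
    norm_num

-- extra fuel beyond the bound does not change the reference loop
theorem fibMul_loopB_stable (f : Nat) : ∀ (n x y : Int), 0 ≤ x → x + 5 ≤ y →
    n ≤ x + 5 * (f : Int) → fibMulLoopB (f+1) n x y = fibMulLoopB f n x y := by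
  induction f with
  | zero =>
    intro n x y hx hxy hn
    rw [fibMul_loopB_succ, if_neg (by push_cast at hn; omega)]
    rfl
  | succ f ih =>
    intro n x y hx hxy hn
    rw [show fibMulLoopB ((f+1)+1) n x y = if x < n then x :: fibMulLoopB (f+1) n y (11*y + x) else [] from rfl,
        show fibMulLoopB (f+1) n x y = if x < n then x :: fibMulLoopB f n y (11*y + x) else [] from rfl]
    by_cases h : x < n
    · rw [if_pos h, if_pos h]
      congr 1
      exact ih n y (11*y + x) (by omega) (by omega) (by push_cast at hn ⊢; omega)
    · rw [if_neg h, if_neg h]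

-- ===== VERDICT (by name: the statement is the Claim_ definition above) =====
theorem fibonacci_multiplos_spec : Claim_equal_fibonacci_multiplos := by
  intro n _
  unfold Spec_fibonacci_multiplos fibonacci_multiplos
  have h := fibMul_main n (n.toNat + 2) 0
  norm_num [Nat.fib] at h
  rw [h, fibMul_alt_eq,
      show n.toNat + 2 = (n.toNat + 1) + 1 from rfl,
      fibMul_loopB_stable (n.toNat + 1) n 0 5 le_rfl (by omega) (by push_cast; omega)]
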